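-- pv_equiv track=rewrite | github.com/maxdudek/pyVote | irv.py | validateBallot
-- ===== SOURCE A (Python) =====
-- def validateBallot(ballot):
--     """
--     Checks to see if a ballot is valid
--     A ballot is valid if the only empty values are at the end of a ballot
--
--     For example, this ballot is valid:
--     ['Cookie Dough', 'Mint Chocolate Chip', 'Vanilla', '', '', '', '', '', '']
--
--     But this ballot is invalid:
--     ['Vanilla', 'Cookies and Cream', 'Cookie Dough', 'Strawberry', '', '', '', '', 'Chocolate']
--
--     Parameters:
--     ballot (list): The unprocessed ballot (empty values haven't been removed)
--
--     Returns:
--     boolean: True if the ballot is valid, False if invalid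
--     """
--
--     # Every ballot must have a first choice
--     if (ballot[0] == ""):
--         return False
--
--     # Every choice after the first empty choice must also be empty
--     # (You can't specify your third choice if you haven't specified your second)
--     try:
--         firstEmpty = ballot.index("")
--         for i in range(firstEmpty, len(ballot)):
--             if ballot[i] != "":
--                 return False
--     except ValueError:
--         # If there are no empty choices, we all good
--         pass
--
--     return True
-- ===== SOURCE B (Python) =====
-- def validateBallot(ballot):
--     # Every ballot must have a first choice
--     if ballot[0] == "":
--         return False
--     # Trim the trailing run of empty entries from the right, then the ballot
--     # is valid iff no empty entry remains in the prefix.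
--     i = len(ballot)
--     while i > 0 and ballot[i-1] == "":
--         i -= 1
--     return "" not in ballot[:i]
-- ===== Notes on version B (the rewrite author's own statement) =====
-- stated objective: simpler
-- what changed: Instead of locating the first empty entry and scanning forward to confirm everything after it is empty, B trims the trailing run of empty entries from the right and checks that no empty entry remains in the prefix.
import Mathlib
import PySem

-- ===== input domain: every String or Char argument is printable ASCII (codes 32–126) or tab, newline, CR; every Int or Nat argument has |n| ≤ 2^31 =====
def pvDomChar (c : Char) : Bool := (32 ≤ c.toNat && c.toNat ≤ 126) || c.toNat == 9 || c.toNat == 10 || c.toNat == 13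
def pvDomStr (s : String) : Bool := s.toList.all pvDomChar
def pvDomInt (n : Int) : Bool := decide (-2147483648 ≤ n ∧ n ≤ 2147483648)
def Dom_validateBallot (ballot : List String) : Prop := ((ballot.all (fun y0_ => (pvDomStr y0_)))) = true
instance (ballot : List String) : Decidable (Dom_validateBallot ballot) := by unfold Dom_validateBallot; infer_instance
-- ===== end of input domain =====

-- B trims the trailing run of empty entries from the right and tests the prefix,
-- instead of A's forward scan from the first empty entry; objective: simpler.

-- ===== PORT A =====
-- the 'for i in range(firstEmpty, len(ballot))' loop with its early 'return False';
-- ballot.getD i "" is exact here because every index used is in range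
def pvLoopA (ballot : List String) (i n : Nat) : Bool :=
  if i < n then
    if ballot.getD i "" ≠ "" then false
    else pvLoopA ballot (i + 1) n
  else true
  termination_by n - i

def validateBallot (ballot : List String) : Bool :=
  match PySem.List.pyGet? ballot 0 with
  | none => false          -- ballot[0] raises IndexError in Python; excluded by Pre_
  | some c0 =>
    if c0 == "" then false
    else
      match PySem.List.index? ballot "" with
      | none => true       -- ValueError branch: no empty choices, we all good
      | some firstEmpty => pvLoopA ballot firstEmpty ballot.length

-- ===== PORT B =====
-- the 'while i > 0 and ballot[i-1] == "": i -= 1' loop, as recursion on i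
def pvTrim (ballot : List String) : Nat → Nat
  | 0 => 0
  | i + 1 => if ballot.getD i "" == "" then pvTrim ballot i else i + 1

def validateBallot_alt (ballot : List String) : Bool :=
  match PySem.List.pyGet? ballot 0 with
  | none => false          -- ballot[0] raises IndexError in Python; excluded by Pre_
  | some c0 =>
    if c0 == "" then false
    else
      let i := pvTrim ballot ballot.length
      !((PySem.List.slice ballot none (some (i : Int))).contains "")

-- ===== PRECONDITION & SPEC =====
-- A evaluates ballot[0] first, so it raises IndexError on the empty list; only that input is excluded.
def Pre_validateBallot (ballot : List String) : Prop := ballot ≠ []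
instance (ballot : List String) : Decidable (Pre_validateBallot ballot) := by unfold Pre_validateBallot; infer_instance
def pvWitness_validateBallot : List String := ["Vanilla", "", ""]

def Spec_validateBallot (ballot : List String) (out : Bool) : Prop := out = validateBallot_alt ballot
instance (ballot : List String) (out : Bool) : Decidable (Spec_validateBallot ballot out) := by unfold Spec_validateBallot; infer_instance

-- ===== CLAIM (what is proved, stated in full; the proofs are below) =====
def Claim_equal_validateBallot : Prop := ∀ (ballot : List String), Dom_validateBallot ballot → Pre_validateBallot ballot → Spec_validateBallot ballot (validateBallot ballot)

-- ===== LEMMAS AND PROOFS =====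

theorem pvTrim_le (l : List String) (i : Nat) : pvTrim l i ≤ i := by
  induction i with
  | zero => simp [pvTrim]
  | succ i ih =>
    unfold pvTrim
    split
    · exact Nat.le_succ_of_le ih
    · exact Nat.le_refl _

theorem pvTrim_drop_empty (l : List String) (i : Nat) :
    ∀ m, pvTrim l i ≤ m → m < i → l.getD m "" = "" := by
  induction i with
  | zero => omega
  | succ i ih =>
    intro m h1 h2
    unfold pvTrim at h1
    split at h1
    · rcases Nat.lt_or_ge m i with h | h
      · exact ih m h1 h
      · have : m = i := by omega
        subst this
        simpa using ‹(l.getD m "" == "") = true›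
    · omega

theorem pvTrim_pos_last (l : List String) (i : Nat) (h : 0 < pvTrim l i) :
    l.getD (pvTrim l i - 1) "" ≠ "" := by
  induction i with
  | zero => simp [pvTrim] at h
  | succ i ih =>
    unfold pvTrim at h ⊢
    split at h
    · rename_i hc; rw [if_pos hc]; exact ih h
    · rename_i hc; rw [if_neg hc]; simpa using hc

theorem pvLoopA_eq_all_drop (l : List String) (i : Nat) :
    pvLoopA l i l.length = (l.drop i).all (fun s => s == "") := by
  have key : ∀ fuel i, l.length - i ≤ fuel →
      pvLoopA l i l.length = (l.drop i).all (fun s => s == "") := by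
    intro fuel
    induction fuel with
    | zero =>
      intro i hi
      have hle : l.length ≤ i := by omega
      rw [pvLoopA, if_neg (by omega), List.drop_eq_nil_of_le hle]
      simp
    | succ fuel ih =>
      intro i hi
      by_cases h : i < l.length
      · rw [pvLoopA, if_pos h]
        have hget : l.getD i "" = l[i] := List.getD_eq_getElem l "" h
        have hdrop : l.drop i = l[i] :: l.drop (i + 1) := List.drop_eq_getElem_cons h
        rw [hdrop, List.all_cons, hget]
        by_cases hv : l[i] = ""
        · rw [if_neg (by simpa using hv), ih (i+1) (by omega)]
          simp [hv]
        · rw [if_pos (by simpa using hv)]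
          simp [hv]
      · rw [pvLoopA, if_neg h, List.drop_eq_nil_of_le (by omega)]
        simp
  exact key l.length i (by omega)

-- ===== VERDICT (by name: the statement is the Claim_ definition above) =====
theorem validateBallot_spec : Claim_equal_validateBallot := by
  intro ballot _ hpre
  unfold Spec_validateBallot
  rcases ballot with _ | ⟨x, xs⟩
  · exact absurd rfl hpre
  set l := x :: xs with hl
  have hget0 : PySem.List.pyGet? l 0 = some x := by simp [hl, PySem.List.pyGet?, PySem.List.pyIdx?]
  rw [validateBallot, validateBallot_alt, hget0]
  by_cases hx : x == ""
  · simp [hx]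
  · simp only [hx, if_neg, Bool.false_eq_true, not_false_iff]
    set j := pvTrim l l.length with hj
    have hslice : PySem.List.slice l none (some (j : Int)) = l.take j :=
      PySem.List.slice_to_natCast l j
    rw [hslice]
    have hj_le : j ≤ l.length := pvTrim_le l l.length
    rcases hidx : PySem.List.index? l "" with _ | k
    · -- no empty entries at all
      have hnot : "" ∉ l := (PySem.List.index?_eq_none_iff l "").mp hidx
      have : "" ∉ l.take j := fun hm => hnot (List.mem_of_mem_take hm)
      simp [this]
    · obtain ⟨hk, hlk, hmin⟩ := PySem.List.getElem_of_index?_eq_some hidx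
      show pvLoopA l k l.length = !(List.take j l).contains ""
      rw [pvLoopA_eq_all_drop]
      by_cases hmem : "" ∈ l.take j
      · -- an empty entry strictly before the trailing run: both sides false
        obtain ⟨m, hm, hval⟩ := List.mem_iff_getElem.mp hmem
        have hmlen : m < l.length := by
          have := hm; simp [List.length_take] at this; omega
        have hmj : m < j := by
          have := hm; simp [List.length_take] at this; omega
        have hvalm : l[m] = "" := by
          rw [← hval]; simp [List.getElem_take]
        have hjpos : 0 < j := by omega
        have hlast := pvTrim_pos_last l l.length (by omega)
        rw [← hj] at hlast
        have hj1len : j - 1 < l.length := by omega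
        have hlast' : l[j-1] ≠ "" := by
          rwa [List.getD_eq_getElem l "" hj1len] at hlast
        have hkm : k ≤ m := by
          by_contra hc
          exact hmin m (by omega) hvalm
        have hfalse : (l.drop k).all (fun s => s == "") = false := by
          rw [Bool.eq_false_iff]
          intro hall
          have hmemdrop : l[j-1] ∈ l.drop k := by
            rw [List.mem_iff_getElem]
            refine ⟨j - 1 - k, by simp [List.length_drop]; omega, ?_⟩
            rw [List.getElem_drop]
            congr 1; omega
          have := List.all_eq_true.mp hall _ hmemdrop
          exact hlast' (by simpa using this)
        simp [hfalse, hmem]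
      · -- all empty entries are trailing: both sides true
        have hjk : j ≤ k := by
          by_contra hc
          apply hmem
          rw [List.mem_iff_getElem]
          exact ⟨k, by simp [List.length_take]; omega, by simp [List.getElem_take, hlk]⟩
        have htrue : (l.drop k).all (fun s => s == "") = true := by
          rw [List.all_eq_true]
          intro s hs
          obtain ⟨m, hm, hval⟩ := List.mem_iff_getElem.mp hs
          have hmlen : k + m < l.length := by
            simp [List.length_drop] at hm; omega
          rw [List.getElem_drop] at hval
          have := pvTrim_drop_empty l l.length (k + m) (by omega) (by omega)
          rw [List.getD_eq_getElem l "" hmlen] at this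
          simp [← hval, this]
        simp [htrue, hmem]
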